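-- pv_equiv track=rewrite | github.com/rdsea/ROHE | src/rohe/orchestration/ensemble_optimization/algorithm.py | generate_possible_deployment
-- ===== SOURCE A (Python) =====
-- def generate_possible_deployment(model_list, infrastructure_list):
--     deployments = []
--     deployment_array = [0] * len(model_list)
--     deployment_array[0] -= 1
--     running_flag = True
--     while running_flag:
--         # update deployment array
--         pointer = 0
--         while True:
--             if pointer >= len(model_list):
--                 break
--             deployment_array[pointer] += 1
--             if deployment_array[pointer] >= len(infrastructure_list):
--                 deployment_array[pointer] = 0
--                 pointer += 1
--             else:
--                 break
--         if pointer >= len(model_list):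
--             break
--
--         # add new deployment
--         deployment = []
--         for i in range(len(model_list)):
--             deployment.append(
--                 {
--                     "model": model_list[i],
--                     "infrastructure": infrastructure_list[deployment_array[i]],
--                 }
--             )
--         deployments.append(deployment)
--     return deployments
-- ===== SOURCE B (Python) =====
-- def generate_possible_deployment(model_list, infrastructure_list):
--     # Recursive cartesian enumeration: fix the first model's infrastructure innermost
--     # so model[0] varies fastest, recurse on the remaining models.
--     def rec(models):
--         if not models:
--             return [[]]
--         tails = rec(models[1:])
--         return [
--             [{"model": models[0], "infrastructure": inf}] + tail
--             for tail in tails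
--             for inf in infrastructure_list
--         ]
--     return rec(model_list)
-- ===== Notes on version B (the rewrite author's own statement) =====
-- stated objective: simpler
-- what changed: A's manual odometer over a mutable digit array (nested while loops with carry and a pointer) is replaced by a recursive cartesian enumeration over model_list that fixes the first model's infrastructure innermost, so model[0] varies fastest exactly as in A; on empty model_list (excluded by Pre_, A raises IndexError) B naturally returns [[]].
import Mathlib
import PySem

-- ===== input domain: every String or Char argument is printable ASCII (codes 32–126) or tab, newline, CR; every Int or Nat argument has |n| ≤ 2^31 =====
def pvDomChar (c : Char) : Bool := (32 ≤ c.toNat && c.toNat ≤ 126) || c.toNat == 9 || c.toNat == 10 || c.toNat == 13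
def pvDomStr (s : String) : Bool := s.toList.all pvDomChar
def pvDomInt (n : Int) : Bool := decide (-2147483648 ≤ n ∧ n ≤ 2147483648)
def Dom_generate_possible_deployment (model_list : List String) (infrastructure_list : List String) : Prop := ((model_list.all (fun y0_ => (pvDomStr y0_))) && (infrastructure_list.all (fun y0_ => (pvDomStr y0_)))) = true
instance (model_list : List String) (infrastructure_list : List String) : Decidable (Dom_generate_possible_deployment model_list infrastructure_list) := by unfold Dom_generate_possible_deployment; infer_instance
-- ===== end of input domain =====

-- B replaces A's manual odometer over an index array by a recursive cartesian
-- enumeration over model_list (objective: simpler).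

-- ===== PORT A =====
-- the inner `while True` pointer loop: increment digit, carry (zero + move pointer) while it overflows;
-- returns none when the pointer runs off the array (pointer >= len(model_list))
def pvStep (n : Nat) : List Int → Option (List Int)
  | [] => none
  | d :: ds =>
    if d + 1 ≥ (n : Int) then (pvStep n ds).map (fun ds' => 0 :: ds')
    else some ((d + 1) :: ds)

-- the `for i in range(len(model_list))` loop building one deployment from the array
def pvRender (models infra : List String) (arr : List Int) : List (List (String × String)) :=
  (List.range models.length).map (fun i =>
    [("model", models.getD i ""), ("infrastructure", infra.getD (arr.getD i 0).toNat "")])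

-- the outer `while running_flag` loop; fuel only bounds the iteration count (the
-- loop performs at most n^m + 1 iterations), the exit condition is pvStep = none
def pvLoop (models infra : List String) (arr : List Int) : Nat → List (List (List (String × String)))
  | 0 => []
  | fuel + 1 =>
    match pvStep infra.length arr with
    | none => []
    | some arr' => pvRender models infra arr' :: pvLoop models infra arr' fuel

def generate_possible_deployment (model_list : List String) (infrastructure_list : List String) : List (List (List (String × String))) :=
  -- deployment_array = [0]*len(model_list); deployment_array[0] -= 1
  let arr : List Int :=
    match List.replicate model_list.length (0 : Int) with
    | [] => []
    | d :: ds => (d - 1) :: ds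
  pvLoop model_list infrastructure_list arr (infrastructure_list.length ^ model_list.length + 1)

-- ===== PORT B =====
-- rec(models): fix the first model's infrastructure innermost, recurse on the rest
def pvAltRec (infra : List String) : List String → List (List (List (String × String)))
  | [] => [[]]
  | m :: rest =>
    (pvAltRec infra rest).flatMap (fun tail =>
      infra.map (fun inf => [("model", m), ("infrastructure", inf)] :: tail))

def generate_possible_deployment_alt (model_list : List String) (infrastructure_list : List String) : List (List (List (String × String))) :=
  pvAltRec infrastructure_list model_list

-- ===== PRECONDITION & SPEC =====
-- Pre_ excludes only the empty model_list, on which A raises IndexError (deployment_array[0] -= 1).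
def Pre_generate_possible_deployment (model_list : List String) (infrastructure_list : List String) : Prop :=
  model_list ≠ []
instance (model_list : List String) (infrastructure_list : List String) : Decidable (Pre_generate_possible_deployment model_list infrastructure_list) := by unfold Pre_generate_possible_deployment; infer_instance

def pvWitness_generate_possible_deployment : List String × List String := (["m"], ["i"])

def Spec_generate_possible_deployment (model_list : List String) (infrastructure_list : List String) (out : List (List (List (String × String)))) : Prop := out = generate_possible_deployment_alt model_list infrastructure_list
instance (model_list : List String) (infrastructure_list : List String) (out : List (List (List (String × String)))) : Decidable (Spec_generate_possible_deployment model_list infrastructure_list out) := by unfold Spec_generate_possible_deployment; infer_instance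

-- ===== CLAIM (what is proved, stated in full; the proofs are below) =====
def Claim_equal_generate_possible_deployment : Prop := ∀ (model_list : List String) (infrastructure_list : List String), Dom_generate_possible_deployment model_list infrastructure_list → Pre_generate_possible_deployment model_list infrastructure_list → Spec_generate_possible_deployment model_list infrastructure_list (generate_possible_deployment model_list infrastructure_list)

-- ===== LEMMAS AND PROOFS =====

-- the full list of successor states of the odometer, defined structurally (no fuel)
def pvSuccs (n : Nat) : List Int → List (List Int)
  | [] => []
  | d :: ds =>
    (List.range' (d + 1).toNat ((n : Int) - 1 - d).toNat).map (fun k => Int.ofNat k :: ds)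
      ++ (pvSuccs n ds).flatMap (fun t => (List.range n).map (fun k => Int.ofNat k :: t))

-- all digit tuples of length k in A's order (first digit fastest)
def pvTuples (n : Nat) : Nat → List (List Int)
  | 0 => [[]]
  | k + 1 => (pvTuples n k).flatMap (fun t => (List.range n).map (fun k' => Int.ofNat k' :: t))

lemma pvFlat_len (n : Nat) (l : List (List Int)) :
    ((l.flatMap (fun t => (List.range n).map (fun k => Int.ofNat k :: t)))).length = n * l.length := by
  induction l with
  | nil => simp
  | cons t l ih => simp [List.flatMap_cons, ih]; ring

lemma pvFlatMap_nil {α β : Type} (l : List α) : l.flatMap (fun _ => ([] : List β)) = [] := by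
  induction l with
  | nil => rfl
  | cons x l ih => simp [List.flatMap_cons, ih]

lemma pvSuccs_len_cons (n : Nat) (d : Int) (ds : List Int) :
    (pvSuccs n (d :: ds)).length = ((n : Int) - 1 - d).toNat + n * (pvSuccs n ds).length := by
  rw [pvSuccs, List.length_append, List.length_map, List.length_range', pvFlat_len]

lemma pvStep_some_pos {n : Nat} {arr a : List Int} (hv : ∀ x ∈ arr, -1 ≤ x)
    (h : pvStep n arr = some a) : 1 ≤ n := by
  induction arr generalizing a with
  | nil => simp [pvStep] at h
  | cons d ds ih =>
    have hd : -1 ≤ d := hv d (by simp)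
    by_cases hc : d + 1 ≥ (n : Int)
    · simp only [pvStep, if_pos hc, Option.map_eq_some_iff] at h
      obtain ⟨a', ha', _⟩ := h
      exact ih (fun x hx => hv x (by simp [hx])) ha'
    · push_neg at hc
      omega

lemma pvStep_valid {n : Nat} {arr a : List Int} (hv : ∀ x ∈ arr, -1 ≤ x)
    (h : pvStep n arr = some a) : ∀ x ∈ a, -1 ≤ x := by
  induction arr generalizing a with
  | nil => simp [pvStep] at h
  | cons d ds ih =>
    have hd : -1 ≤ d := hv d (by simp)
    by_cases hc : d + 1 ≥ (n : Int)
    · simp only [pvStep, if_pos hc, Option.map_eq_some_iff] at h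
      obtain ⟨a', ha', rfl⟩ := h
      intro x hx
      rcases List.mem_cons.1 hx with rfl | hx
      · omega
      · exact ih (fun y hy => hv y (by simp [hy])) ha' x hx
    · simp only [pvStep, if_neg hc] at h
      cases h
      intro x hx
      rcases List.mem_cons.1 hx with rfl | hx
      · omega
      · exact hv x (by simp [hx])

lemma pvSuccs_step {n : Nat} (arr : List Int) (hv : ∀ x ∈ arr, -1 ≤ x) :
    pvSuccs n arr = (match pvStep n arr with
                     | none => []
                     | some a => a :: pvSuccs n a) := by
  induction arr with
  | nil => simp [pvSuccs, pvStep]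
  | cons d ds ih =>
    have hd : -1 ≤ d := hv d (by simp)
    by_cases hc : d + 1 ≥ (n : Int)
    · have hr : ((n : Int) - 1 - d).toNat = 0 := by omega
      have ihds := ih (fun x hx => hv x (by simp [hx]))
      cases hs : pvStep n ds with
      | none =>
        rw [hs] at ihds
        simp [pvSuccs, pvStep, if_pos hc, hs, hr, ihds]
      | some a =>
        rw [hs] at ihds
        have hn : 1 ≤ n := pvStep_some_pos (fun x hx => hv x (by simp [hx])) hs
        have hrange : List.range n = 0 :: List.range' 1 (n - 1) := by
          rw [List.range_eq_range']
          cases n with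
          | zero => omega
          | succ m => simp [List.range'_succ]
        have h0 : ((0 : Int) + 1).toNat = 1 := by norm_num
        have h1 : ((n : Int) - 1 - 0).toNat = n - 1 := by omega
        simp only [pvSuccs, pvStep, if_pos hc, hs, Option.map_some, ihds, hr,
          List.range'_zero, List.map_nil, List.nil_append, List.flatMap_cons, hrange]
        simp [h0, h1]
    · push_neg at hc
      have hcons : List.range' (d + 1).toNat ((n : Int) - 1 - d).toNat
          = (d + 1).toNat :: List.range' ((d + 1).toNat + 1) ((n : Int) - 1 - (d + 1)).toNat := by
        have : ((n : Int) - 1 - d).toNat = ((n : Int) - 1 - (d + 1)).toNat + 1 := by omega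
        rw [this, List.range'_succ]
      have hcast : (((d + 1).toNat : Int)) = d + 1 := by omega
      have hcast2 : (d + 1).toNat + 1 = (d + 1 + 1).toNat := by omega
      simp only [pvSuccs, pvStep, if_neg (by omega : ¬ d + 1 ≥ (n : Int)), hcons,
        List.map_cons, hcast, List.cons_append, hcast2]
      simp [hcast]

lemma pvLoop_eq_succs (models infra : List String) (arr : List Int) (fuel : Nat)
    (hv : ∀ x ∈ arr, -1 ≤ x) (hf : (pvSuccs infra.length arr).length ≤ fuel) :
    pvLoop models infra arr fuel = (pvSuccs infra.length arr).map (pvRender models infra) := by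
  induction fuel generalizing arr with
  | zero =>
    have : pvSuccs infra.length arr = [] := List.eq_nil_of_length_eq_zero (by omega)
    rw [pvSuccs_step arr hv] at this ⊢
    cases hs : pvStep infra.length arr with
    | none => simp [pvLoop]
    | some a => rw [hs] at this; simp at this
  | succ fuel ih =>
    rw [pvSuccs_step arr hv] at hf ⊢
    cases hs : pvStep infra.length arr with
    | none => simp [pvLoop, hs]
    | some a =>
      rw [hs] at hf
      simp only [List.length_cons] at hf
      have hva := pvStep_valid hv hs
      simp only [pvLoop, hs, List.map_cons]
      rw [ih a hva (by omega)]

lemma pvSuccs_len_le (n : Nat) (arr : List Int) (hv : ∀ x ∈ arr, 0 ≤ x) :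
    (pvSuccs n arr).length ≤ n ^ arr.length - 1 := by
  induction arr with
  | nil => simp [pvSuccs]
  | cons d ds ih =>
    have hd : 0 ≤ d := hv d (by simp)
    have ihds := ih (fun x hx => hv x (by simp [hx]))
    rw [pvSuccs_len_cons]
    simp only [List.length_cons]
    rcases Nat.eq_zero_or_pos n with rfl | hn
    · simp
      omega
    · have h1 : ((n : Int) - 1 - d).toNat ≤ n - 1 := by omega
      have h2 : 1 ≤ n ^ ds.length := Nat.one_le_pow _ _ hn
      have h3 : n * (pvSuccs n ds).length ≤ n * (n ^ ds.length - 1) :=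
        Nat.mul_le_mul_left _ ihds
      have h4 : n * (n ^ ds.length - 1) = n * n ^ ds.length - n := by
        rw [Nat.mul_sub]; ring_nf
      have h5 : n * n ^ ds.length = n ^ (ds.length + 1) := by ring
      have h6 : n ≤ n * n ^ ds.length := Nat.le_mul_of_pos_right _ h2
      omega

lemma pvSuccs_zeros (n : Nat) (hn : 1 ≤ n) (k : Nat) :
    List.replicate k (0 : Int) :: pvSuccs n (List.replicate k 0) = pvTuples n k := by
  induction k with
  | zero => simp [pvSuccs, pvTuples]
  | succ k ih =>
    have hrange : List.range n = 0 :: List.range' 1 (n - 1) := by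
      rw [List.range_eq_range']
      cases n with
      | zero => omega
      | succ m => simp [List.range'_succ]
    have h0 : ((0 : Int) + 1).toNat = 1 := by norm_num
    have h1 : ((n : Int) - 1 - 0).toNat = n - 1 := by omega
    calc List.replicate (k + 1) (0 : Int) :: pvSuccs n (List.replicate (k + 1) 0)
        = (List.range n).map (fun j => Int.ofNat j :: List.replicate k 0)
            ++ (pvSuccs n (List.replicate k 0)).flatMap
                 (fun t => (List.range n).map (fun j => Int.ofNat j :: t)) := by
          simp only [List.replicate_succ, pvSuccs, h0, h1, hrange]
          simp
      _ = (List.replicate k (0 : Int) :: pvSuccs n (List.replicate k 0)).flatMap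
            (fun t => (List.range n).map (fun j => Int.ofNat j :: t)) := by
          simp [List.flatMap_cons]
      _ = pvTuples n (k + 1) := by rw [ih]; rfl

lemma pvSuccs_init (n : Nat) (k : Nat) :
    pvSuccs n ((-1) :: List.replicate k 0) = pvTuples n (k + 1) := by
  rcases Nat.eq_zero_or_pos n with rfl | hn
  · simp only [pvSuccs, pvTuples, List.range_zero, List.map_nil, List.nil_append,
      List.range'_zero, pvFlatMap_nil]
    norm_num
  · have h0 : ((-1 : Int) + 1).toNat = 0 := by norm_num
    have h1 : ((n : Int) - 1 - (-1)).toNat = n := by omega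
    calc pvSuccs n ((-1) :: List.replicate k 0)
        = (List.range n).map (fun j => Int.ofNat j :: List.replicate k 0)
            ++ (pvSuccs n (List.replicate k 0)).flatMap
                 (fun t => (List.range n).map (fun j => Int.ofNat j :: t)) := by
          simp only [pvSuccs, h0, h1, List.range_eq_range']
      _ = (List.replicate k (0 : Int) :: pvSuccs n (List.replicate k 0)).flatMap
            (fun t => (List.range n).map (fun j => Int.ofNat j :: t)) := by
          simp [List.flatMap_cons]
      _ = pvTuples n (k + 1) := by rw [pvSuccs_zeros n hn k]; rfl

lemma pvRender_cons (m : String) (rest : List String) (infra : List String)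
    (d : Nat) (t : List Int) :
    pvRender (m :: rest) infra ((d : Int) :: t)
      = [("model", m), ("infrastructure", infra.getD d "")] :: pvRender rest infra t := by
  simp only [pvRender, List.length_cons, List.range_succ_eq_map, List.map_cons, List.map_map]
  congr 1

lemma pvMap_range_getD {α β : Type} (xs : List α) (d : α) (f : α → β) :
    (List.range xs.length).map (fun i => f (xs.getD i d)) = xs.map f := by
  induction xs with
  | nil => simp
  | cons x xs ih =>
    simp only [List.length_cons, List.range_succ_eq_map, List.map_cons, List.map_map]
    rw [← ih]
    congr 1

lemma pvTuples_render (infra : List String) (models : List String) :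
    (pvTuples infra.length models.length).map (pvRender models infra) = pvAltRec infra models := by
  induction models with
  | nil => simp [pvTuples, pvAltRec, pvRender]
  | cons m rest ih =>
    simp only [List.length_cons, pvTuples, pvAltRec, List.map_flatMap, ← ih,
      List.flatMap_map]
    congr 1
    funext t
    simp only [List.map_map]
    calc (List.range infra.length).map (pvRender (m :: rest) infra ∘ fun k' => Int.ofNat k' :: t)
        = (List.range infra.length).map
            (fun j => [("model", m), ("infrastructure", infra.getD j "")] :: pvRender rest infra t) := by
          congr 1
          funext j
          simpa using pvRender_cons m rest infra j t
      _ = infra.map (fun inf => [("model", m), ("infrastructure", inf)] :: pvRender rest infra t) := by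
          exact pvMap_range_getD infra ""
            (fun inf => [("model", m), ("infrastructure", inf)] :: pvRender rest infra t)

lemma pvStep_zero (arr : List Int) (hv : ∀ x ∈ arr, -1 ≤ x) : pvStep 0 arr = none := by
  induction arr with
  | nil => rfl
  | cons d ds ih =>
    have hd : -1 ≤ d := hv d (by simp)
    have h : d + 1 ≥ ((0 : Nat) : Int) := by push_cast; omega
    simp only [pvStep, if_pos h, ih (fun x hx => hv x (by simp [hx])), Option.map_none]

lemma pvAltRec_nil_infra (models : List String) (h : models ≠ []) :
    pvAltRec [] models = [] := by
  cases models with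
  | nil => exact absurd rfl h
  | cons m rest => simp [pvAltRec]

theorem generate_possible_deployment_eq (model_list : List String) (infrastructure_list : List String)
    (hpre : model_list ≠ []) :
    generate_possible_deployment model_list infrastructure_list
      = generate_possible_deployment_alt model_list infrastructure_list := by
  obtain ⟨m, rest, rfl⟩ : ∃ m rest, model_list = m :: rest := by
    cases model_list with
    | nil => exact absurd rfl hpre
    | cons m rest => exact ⟨m, rest, rfl⟩
  set n := infrastructure_list.length with hn
  set k := rest.length with hk
  have hinit : (match List.replicate (m :: rest).length (0 : Int) with
      | [] => ([] : List Int)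
      | d :: ds => (d - 1) :: ds) = (-1) :: List.replicate k 0 := by
    simp only [List.length_cons, List.replicate_succ, hk]
    norm_num
  have hvinit : ∀ x ∈ ((-1) : Int) :: List.replicate k 0, -1 ≤ x := by
    intro x hx
    rcases List.mem_cons.1 hx with rfl | hx
    · omega
    · have := List.eq_of_mem_replicate hx
      omega
  rcases Nat.eq_zero_or_pos n with hn0 | hnpos
  · have hinfra : infrastructure_list = [] := List.eq_nil_of_length_eq_zero hn0
    subst hinfra
    simp only [generate_possible_deployment, generate_possible_deployment_alt]
    rw [hinit]
    have hfuel : (List.length ([] : List String)) ^ (m :: rest).length + 1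
        = 0 ^ (m :: rest).length + 1 := rfl
    rw [pvAltRec_nil_infra _ (by simp)]
    have hstep : pvStep (List.length ([] : List String)) ((-1) :: List.replicate k 0) = none :=
      pvStep_zero _ hvinit
    cases hfl : (0 : Nat) ^ (m :: rest).length + 1 with
    | zero => omega
    | succ f =>
      simp only [List.length_nil] at hstep ⊢
      simp [pvLoop, hstep]
  · -- n ≥ 1
    have hlen0 : (pvSuccs n (List.replicate k 0)).length ≤ n ^ k - 1 := by
      have := pvSuccs_len_le n (List.replicate k 0)
        (fun x hx => by have := List.eq_of_mem_replicate hx; omega)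
      simpa using this
    have hlen : (pvSuccs n ((-1) :: List.replicate k 0)).length ≤ n ^ (k + 1) := by
      rw [pvSuccs_len_cons]
      have h1 : ((n : Int) - 1 - (-1)).toNat = n := by omega
      have h2 : 1 ≤ n ^ k := Nat.one_le_pow _ _ hnpos
      have h3 : n * (pvSuccs n (List.replicate k 0)).length ≤ n * (n ^ k - 1) :=
        Nat.mul_le_mul_left _ hlen0
      have h4 : n * (n ^ k - 1) = n * n ^ k - n := by rw [Nat.mul_sub]; ring_nf
      have h5 : n * n ^ k = n ^ (k + 1) := by ring
      have h6 : n ≤ n * n ^ k := Nat.le_mul_of_pos_right _ h2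
      omega
    simp only [generate_possible_deployment, generate_possible_deployment_alt]
    rw [hinit]
    have hml : (m :: rest).length = k + 1 := rfl
    rw [hml]
    rw [pvLoop_eq_succs _ _ _ _ hvinit (by rw [← hn]; omega)]
    rw [← hn, pvSuccs_init n k]
    have := pvTuples_render infrastructure_list (m :: rest)
    rw [← hn, hml] at this
    exact this

-- ===== VERDICT (by name: the statement is the Claim_ definition above) =====
theorem generate_possible_deployment_spec : Claim_equal_generate_possible_deployment := by
  intro model_list infrastructure_list _ hpre
  unfold Spec_generate_possible_deployment
  exact generate_possible_deployment_eq model_list infrastructure_list hpre
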